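-- pv_equiv track=rewrite | github.com/compat-project/QCG-PilotJob | components/core/qcg/pilotjob/environment.py | _check_same_cores
-- ===== SOURCE A (Python) =====
-- def _check_same_cores(tasks_list):
--     same = None
--
--     for elem in tasks_list.split(','):
--         if same is not None:
--             if elem != same:
--                 return None
--         else:
--             same = elem
--
--     return same
-- ===== SOURCE B (Python) =====
-- def _check_same_cores(tasks_list):
--     parts = tasks_list.split(',')
--     if len(set(parts)) == 1:
--         return parts[0]
--     return None
-- ===== Notes on version B (the rewrite author's own statement) =====
-- stated objective: simpler
-- what changed: Replaces the sequential sentinel-maintaining loop with early return by one split, a set construction and a cardinality test: all tokens are identical iff the set of tokens has size 1.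
import Mathlib
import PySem

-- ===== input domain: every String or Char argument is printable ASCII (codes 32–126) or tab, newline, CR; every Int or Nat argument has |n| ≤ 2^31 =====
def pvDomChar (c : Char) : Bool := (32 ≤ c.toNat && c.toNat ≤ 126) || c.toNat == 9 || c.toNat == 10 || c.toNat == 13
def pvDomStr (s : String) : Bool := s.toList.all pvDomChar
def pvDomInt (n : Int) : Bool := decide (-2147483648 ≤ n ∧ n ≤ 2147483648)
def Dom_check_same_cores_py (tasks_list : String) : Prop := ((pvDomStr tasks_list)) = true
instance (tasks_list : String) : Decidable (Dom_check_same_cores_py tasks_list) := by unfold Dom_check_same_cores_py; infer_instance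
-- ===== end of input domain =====

-- B replaces A's sentinel-maintaining loop with one set construction and a cardinality test (objective: simpler).

-- shared exact port of tasks_list.split(',') (sep is the nonempty literal ","; PySem.Chars.splitOn is the sep ≠ "" form)
def pvSplit (s : String) : List String := (PySem.Chars.splitOn s.toList ",".toList).map String.ofList

-- ===== PORT A =====
-- A's for-loop over the split tokens with the 'same' sentinel (None = not yet set; returning none = Python's early 'return None').
def pvLoopA : List String → Option String → Option String
  | [], same => same
  | elem :: rest, some s => if elem ≠ s then none else pvLoopA rest (some s)
  | elem :: rest, none => pvLoopA rest (some elem)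

def check_same_cores_py (tasks_list : String) : Option String :=
  pvLoopA (pvSplit tasks_list) none

-- ===== PORT B =====
-- parts[0] on the always-nonempty split result is ported as parts.head? (exact: split(',') never yields []).
def check_same_cores_py_alt (tasks_list : String) : Option String :=
  let parts := pvSplit tasks_list
  if PySem.Set.len (PySem.Set.ofList parts) == 1 then parts.head? else none

-- ===== PRECONDITION & SPEC =====
def Spec_check_same_cores_py (tasks_list : String) (out : Option String) : Prop := out = check_same_cores_py_alt tasks_list
instance (tasks_list : String) (out : Option String) : Decidable (Spec_check_same_cores_py tasks_list out) := by unfold Spec_check_same_cores_py; infer_instance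

-- ===== CLAIM (what is proved, stated in full; the proofs are below) =====
def Claim_equal_check_same_cores_py : Prop := ∀ (tasks_list : String), Dom_check_same_cores_py tasks_list → Spec_check_same_cores_py tasks_list (check_same_cores_py tasks_list)

-- ===== LEMMAS AND PROOFS =====

-- A's loop, once the sentinel is set, checks every remaining token against it.
theorem pvLoopA_some (rest : List String) (s : String) :
    pvLoopA rest (some s) = if rest.all (· == s) then some s else none := by
  induction rest with
  | nil => simp [pvLoopA]
  | cons e r ih =>
    simp only [pvLoopA, List.all_cons, ih]
    by_cases h : e = s
    · simp [h]
    · simp [h]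

-- Set.add never shrinks a set.
theorem pv_length_le_foldl_add (rest : List String) (s : PySem.Set String) :
    s.length ≤ (List.foldl PySem.Set.add s rest).length := by
  induction rest generalizing s with
  | nil => simp
  | cons e r ih =>
    refine le_trans ?_ (ih (PySem.Set.add s e))
    unfold PySem.Set.add
    split
    · exact le_refl _
    · simp

-- Folding Set.add over rest starting from the singleton {p} stays a singleton iff every token equals p.
theorem pv_foldl_singleton (rest : List String) (p : String) :
    ((List.foldl PySem.Set.add [p] rest).length = 1) ↔ (rest.all (· == p) = true) := by
  induction rest with
  | nil => simp
  | cons e r ih =>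
    simp only [List.foldl_cons, List.all_cons]
    by_cases he : e = p
    · have h1 : PySem.Set.add [p] e = [p] := by simp [PySem.Set.add, he]
      rw [h1]; simp [he, ih]
    · have h1 : PySem.Set.add [p] e = [p, e] := by
        simp [PySem.Set.add]
        intro h'; exact he h'
      rw [h1]
      have hge := pv_length_le_foldl_add r [p, e]
      have h2 : ¬ ((List.foldl PySem.Set.add [p, e] r).length = 1) := by
        simp at hge; omega
      simp [h2, he]

-- The set built from p :: rest is a singleton iff every later token equals p.
theorem pv_card_one (p : String) (rest : List String) :
    ((PySem.Set.ofList (p :: rest)).length = 1) ↔ (rest.all (· == p) = true) := by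
  have h : PySem.Set.ofList (p :: rest) = List.foldl PySem.Set.add [p] rest := by
    simp [PySem.Set.ofList_eq_foldl, List.foldl_cons, PySem.Set.add]
  rw [h]
  exact pv_foldl_singleton rest p

-- ===== VERDICT (by name: the statement is the Claim_ definition above) =====
theorem check_same_cores_py_spec : Claim_equal_check_same_cores_py := by
  intro tasks_list _
  unfold Spec_check_same_cores_py check_same_cores_py check_same_cores_py_alt
  cases hsplit : pvSplit tasks_list with
  | nil => simp [pvLoopA, PySem.Set.ofList, PySem.Set.len, PySem.Set.empty]
  | cons p rest =>
    simp only [pvLoopA, pvLoopA_some, List.head?]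
    have hc := pv_card_one p rest
    by_cases hall : rest.all (· == p) = true
    · simp only [hall, if_true]
      simp [hc.mpr hall]
    · simp only [hall, if_false, Bool.false_eq_true]
      have h1 : ¬ (List.length (PySem.Set.ofList (p :: rest)) = 1) := fun h => hall (hc.mp h)
      simp only [PySem.Set.len]
      simp [h1]
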